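-- pv_equiv track=rewrite | github.com/LindgeW/MetaAug4NER | processing/conll_util.py | char2word_bi
-- ===== SOURCE A (Python) =====
-- def char2word_bi(inst):
--     seg_insts = []
--     one_wd = []
--     is_start = False
--     n = len(inst['cws'])
--     for i, cws in enumerate(inst['cws']):
--         one_wd.append(inst['wd'][i])
--         if cws.lower() == 'b':
--             is_start = True
--             if i == n - 1 or inst['cws'][i + 1].lower() != 'i':
--                 seg_insts.append(one_wd)
--                 one_wd = []
--                 is_start = False
--         elif cws.lower() == 'i' and (i == n - 1 or inst['cws'][i + 1].lower() != 'i'):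
--             if is_start:
--                 seg_insts.append(one_wd)
--                 is_start = False
--             one_wd = []
--     return seg_insts
-- ===== SOURCE B (Python) =====
-- def char2word_bi(inst):
--     cws = inst['cws']
--     n = len(cws)
--     words = [inst['wd'][i] for i in range(n)]
--     lows = [t.lower() for t in cws]
--     ends = [i for i in range(n)
--             if lows[i] in ('b', 'i') and (i == n - 1 or lows[i + 1] != 'i')]
--     seg_insts = []
--     start = 0
--     for end in ends:
--         if 'b' in lows[start:end + 1]:
--             seg_insts.append(words[start:end + 1])
--         start = end + 1
--     return seg_insts
-- ===== Notes on version B (the rewrite author's own statement) =====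
-- stated objective: alternative
-- what changed: Replaces A's single stateful pass (char accumulator one_wd plus is_start flag with in-loop emission) by a two-phase boundary scan: first collect segment-end indices, then cut each segment out with a slice and keep it iff its tag slice contains a 'b'.
import Mathlib
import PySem

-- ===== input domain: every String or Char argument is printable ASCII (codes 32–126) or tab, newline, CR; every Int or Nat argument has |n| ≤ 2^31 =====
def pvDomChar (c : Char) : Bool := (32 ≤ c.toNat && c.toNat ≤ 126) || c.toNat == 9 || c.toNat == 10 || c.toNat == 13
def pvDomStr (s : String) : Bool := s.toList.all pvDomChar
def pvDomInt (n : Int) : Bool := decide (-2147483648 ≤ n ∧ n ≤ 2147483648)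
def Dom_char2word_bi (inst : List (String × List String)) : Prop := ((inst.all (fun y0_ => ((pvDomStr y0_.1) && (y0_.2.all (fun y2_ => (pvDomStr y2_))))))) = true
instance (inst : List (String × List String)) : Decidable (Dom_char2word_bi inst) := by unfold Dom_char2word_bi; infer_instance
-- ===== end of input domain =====

-- B replaces A's single stateful pass (accumulator + is_start flag) by a boundary-index scan
-- followed by slice extraction; equal return value on Pre_.

-- ===== PORT A =====
-- the for-loop of A: state (seg_insts, one_wd, is_start), iterating enumerate(inst['cws'])
def aGo (cws wd : List String) (n : Nat) :
    List (Int × String) → List (List String) → List String → Bool → List (List String)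
  | [], segs, _, _ => segs
  | (i, c) :: rest, segs, one, isS =>
    let one' := one ++ [(PySem.List.pyGet? wd i).getD ""]   -- inst['wd'][i]; Pre_ rules out IndexError
    if PySem.Str.lower c = "b" then
      if i = (n : Int) - 1 ∨ PySem.Str.lower ((PySem.List.pyGet? cws (i + 1)).getD "") ≠ "i" then
        aGo cws wd n rest (segs ++ [one']) [] false
      else
        aGo cws wd n rest segs one' true
    else if PySem.Str.lower c = "i" ∧
        (i = (n : Int) - 1 ∨ PySem.Str.lower ((PySem.List.pyGet? cws (i + 1)).getD "") ≠ "i") then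
      if isS then aGo cws wd n rest (segs ++ [one']) [] false
      else aGo cws wd n rest segs [] false
    else
      aGo cws wd n rest segs one' isS

def char2word_bi (inst : List (String × List String)) : List (List String) :=
  let cws := (List.lookup "cws" inst).getD []   -- inst['cws']; Pre_ rules out KeyError
  let wd := (List.lookup "wd" inst).getD []     -- inst['wd'];  Pre_ rules out KeyError
  aGo cws wd cws.length (PySem.List.enumerate cws 0) [] [] false

-- ===== PORT B =====
-- the boundary test of B: lows[i] in ('b','i') and (i == n-1 or lows[i+1] != 'i')
def bCond (lows : List String) (n : Nat) (i : Int) : Bool :=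
  ((PySem.List.pyGet? lows i).getD "" == "b" || (PySem.List.pyGet? lows i).getD "" == "i") &&
  (i == (n : Int) - 1 || (PySem.List.pyGet? lows (i + 1)).getD "" != "i")

-- the for-loop of B over the boundary list `ends`, carrying (seg_insts, start)
def bGo (lows words : List String) :
    List Int → List (List String) → Int → List (List String)
  | [], segs, _ => segs
  | e :: rest, segs, start =>
    let segs' := if (PySem.List.slice lows (some start) (some (e + 1))).contains "b"
                 then segs ++ [PySem.List.slice words (some start) (some (e + 1))] else segs
    bGo lows words rest segs' (e + 1)

def char2word_bi_alt (inst : List (String × List String)) : List (List String) :=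
  let cws := (List.lookup "cws" inst).getD []   -- inst['cws']; Pre_ rules out KeyError
  let n := cws.length
  let words := (PySem.List.pyRange 0 (n : Int) 1).map
      (fun i => (PySem.List.pyGet? ((List.lookup "wd" inst).getD []) i).getD "")
  let lows := cws.map PySem.Str.lower
  let ends := (PySem.List.pyRange 0 (n : Int) 1).filter (bCond lows n)
  bGo lows words ends [] 0

-- ===== PRECONDITION & SPEC =====
-- Pre_ excludes exactly the inputs where the Python A raises: a missing 'cws' key (KeyError),
-- and, when 'cws' is non-empty, a missing 'wd' key (KeyError) or a 'wd' list shorter than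
-- 'cws' (IndexError at inst['wd'][i]).
def Pre_char2word_bi (inst : List (String × List String)) : Prop :=
  (List.lookup "cws" inst).isSome ∧
  ((List.lookup "cws" inst).getD [] = [] ∨
    ((List.lookup "wd" inst).isSome ∧
      ((List.lookup "cws" inst).getD []).length ≤ ((List.lookup "wd" inst).getD []).length))
instance (inst : List (String × List String)) : Decidable (Pre_char2word_bi inst) := by
  unfold Pre_char2word_bi; infer_instance

def pvWitness_char2word_bi : (List (String × List String)) :=
  [("cws", ["B", "I", "O", "b"]), ("wd", ["w1", "w2", "w3", "w4"])]

def Spec_char2word_bi (inst : List (String × List String)) (out : List (List String)) : Prop := out = char2word_bi_alt inst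
instance (inst : List (String × List String)) (out : List (List String)) : Decidable (Spec_char2word_bi inst out) := by unfold Spec_char2word_bi; infer_instance

-- ===== CLAIM (what is proved, stated in full; the proofs are below) =====
def Claim_equal_char2word_bi : Prop := ∀ (inst : List (String × List String)), Dom_char2word_bi inst → Pre_char2word_bi inst → Spec_char2word_bi inst (char2word_bi inst)

-- ===== LEMMAS AND PROOFS =====

-- the lowered tag at index j (an out-of-range read gives "", like both ports' `.getD ""`)
def lowAt (cws : List String) (j : Nat) : String := PySem.Str.lower (cws[j]?.getD "")

-- the word list both ports draw segments from
def wordsL (cws wd : List String) : List String :=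
  (List.range cws.length).map (fun j => wd[j]?.getD "")

-- "some tag in [s, i) lowers to 'b'"
def anyB (cws : List String) (s i : Nat) : Bool :=
  (List.range' s (i - s)).any (fun j => lowAt cws j == "b")

-- "index i ends a segment": tag lowers to b/i and the next tag does not lower to i
def isEndB (cws : List String) (i : Nat) : Bool :=
  (lowAt cws i == "b" || lowAt cws i == "i") &&
  (i == cws.length - 1 || lowAt cws (i + 1) != "i")

-- common functional description of both loops: scan i upward from a fresh segment start s;
-- at each segment end emit words[s:i+1] iff some tag in [s, i] lowers to 'b'
def specF (cws wd : List String) : Nat → Nat → Nat → List (List String)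
  | 0, _, _ => []
  | f + 1, i, s =>
    if i < cws.length then
      if isEndB cws i then
        (if anyB cws s (i + 1) then [((wordsL cws wd).drop s).take (i + 1 - s)] else [])
          ++ specF cws wd f (i + 1) (i + 1)
      else specF cws wd f (i + 1) s
    else []

lemma anyB_self (cws : List String) (s : Nat) : anyB cws s s = false := by simp [anyB]

lemma anyB_succ (cws : List String) (s i : Nat) (h : s ≤ i) :
    anyB cws s (i + 1) = (anyB cws s i || (lowAt cws i == "b")) := by
  have h1 : i + 1 - s = (i - s) + 1 := by omega
  have h2 : s + (i - s) = i := by omega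
  rw [anyB, anyB, h1, List.range'_1_concat, h2]
  simp

lemma lower_nil : PySem.Str.lower "" = "" := by decide

lemma lowAt_append (pre suf : List String) (c : String) :
    lowAt (pre ++ c :: suf) pre.length = PySem.Str.lower c := by
  simp [lowAt]

lemma lowAt_map (cws : List String) (j : Nat) :
    (PySem.List.pyGet? (cws.map PySem.Str.lower) (j : Int)).getD "" = lowAt cws j := by
  simp [lowAt]
  cases cws[j]? <;> simp [lower_nil]

lemma wordsL_get (cws wd : List String) (i : Nat) (hi : i < cws.length) :
    (wordsL cws wd)[i]? = some (wd[i]?.getD "") := by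
  simp [wordsL, hi]

lemma segTake (cws wd : List String) (s i : Nat) (hs : s ≤ i) (hi : i < cws.length) :
    ((wordsL cws wd).drop s).take (i - s) ++ [wd[i]?.getD ""]
      = ((wordsL cws wd).drop s).take (i + 1 - s) := by
  have h1 : i + 1 - s = (i - s) + 1 := by omega
  rw [h1, List.take_add_one, List.getElem?_drop]
  have h2 : s + (i - s) = i := by omega
  rw [h2, wordsL_get cws wd i hi]
  rfl

lemma bCond_eq (cws : List String) (k : Nat) (hk : k < cws.length) :
    bCond (cws.map PySem.Str.lower) cws.length (k : Int) = isEndB cws k := by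
  have h1 : ((k : Int) + 1) = ((k + 1 : Nat) : Int) := by push_cast; ring
  rw [bCond, isEndB, h1, lowAt_map, lowAt_map]
  have h2 : ((k : Int) = (cws.length : Int) - 1) ↔ (k = cws.length - 1) := by omega
  apply Bool.eq_iff_iff.mpr
  simp only [Bool.and_eq_true, Bool.or_eq_true, beq_iff_eq, bne_iff_ne]
  rw [h2]

lemma sliceLow_eq (cws : List String) (s i : Nat) (hs : s ≤ i) (hi : i ≤ cws.length) :
    ((cws.map PySem.Str.lower).drop s).take (i - s) = (List.range' s (i - s)).map (lowAt cws) := by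
  apply List.ext_getElem
  · simp; omega
  · intro t h1 h2
    simp only [List.getElem_take, List.getElem_drop, List.getElem_map, List.getElem_range']
    have ht : s + t < cws.length := by simp at h2; omega
    simp [lowAt, ht]

lemma containsB_eq (cws : List String) (s i : Nat) (hs : s ≤ i) (hi : i ≤ cws.length) :
    (((cws.map PySem.Str.lower).drop s).take (i - s)).contains "b" = anyB cws s i := by
  rw [sliceLow_eq cws s i hs hi, anyB, ← List.any_beq']
  simp [List.any_map]
  rfl

lemma memB_iff (cws : List String) (s i : Nat) (hs : s ≤ i) (hi : i ≤ cws.length) :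
    ("b" ∈ ((cws.map PySem.Str.lower).drop s).take (i - s)) ↔ anyB cws s i = true := by
  rw [← containsB_eq cws s i hs hi]
  exact List.contains_iff_mem.symm

lemma lemB (cws wd : List String) : ∀ (f k s : Nat) (segs : List (List String)),
    f = cws.length - k → s ≤ k →
    bGo (cws.map PySem.Str.lower) (wordsL cws wd)
        ((PySem.List.pyRange (k : Int) (cws.length : Int) 1).filter
          (bCond (cws.map PySem.Str.lower) cws.length))
        segs (s : Int)
      = segs ++ specF cws wd f k s := by
  intro f
  induction f with
  | zero =>
    intro k s segs hf _
    have hk : (cws.length : Int) ≤ (k : Int) := by omega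
    rw [PySem.List.pyRange_one_eq_nil hk]
    simp [bGo, specF]
  | succ f ih =>
    intro k s segs hf hs
    have hk : k < cws.length := by omega
    have hkZ : (k : Int) < (cws.length : Int) := by omega
    have hcast : ((k : Int) + 1) = ((k + 1 : Nat) : Int) := by push_cast; ring
    rw [PySem.List.pyRange_one_cons hkZ, List.filter_cons, bCond_eq cws k hk]
    have hslice : ∀ (xs : List String),
        PySem.List.slice xs (some (s : Int)) (some ((k : Int) + 1))
          = (xs.drop s).take (k + 1 - s) := by
      intro xs; rw [hcast, PySem.List.slice_natCast]
    cases hE : isEndB cws k with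
    | false =>
      simp only [Bool.false_eq_true, if_false]
      rw [hcast, ih (k + 1) s segs (by omega) (by omega)]
      conv_rhs => rw [specF]
      simp [hk, hE]
    | true =>
      simp only [if_true]
      simp only [bGo, hcast]
      rw [ih (k + 1) (k + 1) _ (by omega) (by omega)]
      conv_rhs => rw [specF]
      simp only [hk, if_true, hE]
      cases hA : anyB cws s (k + 1) with
      | false =>
        have hnot : "b" ∉ PySem.List.slice (cws.map PySem.Str.lower) (some (s : Int)) (some ((k : Int) + 1)) := by
          rw [hslice]
          intro hmem
          have := (memB_iff cws s (k + 1) (by omega) (by omega)).mp hmem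
          rw [hA] at this
          exact Bool.noConfusion this
        simp [hnot]
      | true =>
        have hmem : "b" ∈ ((cws.map PySem.Str.lower).drop s).take (k + 1 - s) :=
          (memB_iff cws s (k + 1) (by omega) (by omega)).mpr hA
        simp [hmem, hslice]

lemma lemA (wd : List String) : ∀ (suf pre : List String) (s : Nat) (segs : List (List String)),
    s ≤ pre.length →
    aGo (pre ++ suf) wd (pre ++ suf).length
        (PySem.List.enumerate suf (pre.length : Int)) segs
        (((wordsL (pre ++ suf) wd).drop s).take (pre.length - s))
        (anyB (pre ++ suf) s pre.length)
      = segs ++ specF (pre ++ suf) wd suf.length pre.length s := by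
  intro suf
  induction suf with
  | nil =>
    intro pre s segs hs
    simp [PySem.List.enumerate_nil, aGo, specF]
  | cons c suf ih =>
    intro pre s segs hs
    have hilt : pre.length < (pre ++ c :: suf).length := by simp
    have hlowc : lowAt (pre ++ c :: suf) pre.length = PySem.Str.lower c :=
      lowAt_append pre suf c
    have hcast1 : ((pre.length : Nat) : Int) + 1 = ((pre.length + 1 : Nat) : Int) := by
      push_cast; ring
    have hlook : PySem.Str.lower ((PySem.List.pyGet? (pre ++ c :: suf)
        ((pre.length : Int) + 1)).getD "") = lowAt (pre ++ c :: suf) (pre.length + 1) := by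
      rw [hcast1, PySem.List.pyGet?_natCast]; rfl
    have hint : ((pre.length : Int) = (((pre ++ c :: suf).length : Nat) : Int) - 1) ↔
        (pre.length = (pre ++ c :: suf).length - 1) := by
      constructor <;> (intro h; omega)
    -- the IH instantiated at pre ++ [c]
    have IH : ∀ (s' : Nat) (segs' : List (List String)), s' ≤ pre.length + 1 →
        aGo (pre ++ c :: suf) wd (pre ++ c :: suf).length
            (PySem.List.enumerate suf (((pre.length + 1 : Nat) : Int))) segs'
            (((wordsL (pre ++ c :: suf) wd).drop s').take (pre.length + 1 - s'))
            (anyB (pre ++ c :: suf) s' (pre.length + 1))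
          = segs' ++ specF (pre ++ c :: suf) wd suf.length (pre.length + 1) s' := by
      intro s' segs' hs'
      have := ih (pre ++ [c]) s' segs' (by simpa using hs')
      simpa [List.append_assoc] using this
    rw [PySem.List.enumerate_cons]
    simp only [aGo]
    simp only [hlook]
    simp only [PySem.List.pyGet?_natCast, hcast1]
    have hseg : List.take (pre.length - s) (List.drop s (wordsL (pre ++ c :: suf) wd))
        ++ [wd[pre.length]?.getD ""]
        = List.take (pre.length + 1 - s) (List.drop s (wordsL (pre ++ c :: suf) wd)) :=
      segTake (pre ++ c :: suf) wd s pre.length hs hilt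
    rw [hseg]
    simp only [List.length_cons]
    split_ifs with h1 h2 h3 h4
    · -- 'b' at a segment end: emit
      have hC : pre.length = (pre ++ c :: suf).length - 1 ∨
          lowAt (pre ++ c :: suf) (pre.length + 1) ≠ "i" := by
        rcases h2 with h | h
        · exact Or.inl (hint.mp h)
        · exact Or.inr h
      have hEnd : isEndB (pre ++ c :: suf) pre.length = true := by
        simp only [isEndB, Bool.and_eq_true, Bool.or_eq_true, beq_iff_eq, bne_iff_ne]
        exact ⟨Or.inl (by rw [hlowc, h1]), hC⟩
      have hAny : anyB (pre ++ c :: suf) s (pre.length + 1) = true := by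
        rw [anyB_succ _ _ _ hs, hlowc, h1]
        simp
      have hIH := IH (pre.length + 1)
        (segs ++ [List.take (pre.length + 1 - s) (List.drop s (wordsL (pre ++ c :: suf) wd))])
        (by omega)
      simp only [Nat.sub_self, List.take_zero, anyB_self] at hIH
      rw [hIH]
      conv_rhs => rw [specF]
      simp [hEnd, hAny]
    · -- 'b' continued by 'i': keep accumulating
      have hNe : pre.length ≠ (pre ++ c :: suf).length - 1 ∧
          lowAt (pre ++ c :: suf) (pre.length + 1) = "i" := by
        push Not at h2
        exact ⟨fun h => h2.1 (hint.mpr h), h2.2⟩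
      have hEnd : isEndB (pre ++ c :: suf) pre.length = false := by
        apply Bool.eq_false_iff.mpr
        simp only [isEndB, Bool.and_eq_true, Bool.or_eq_true, beq_iff_eq, bne_iff_ne, ne_eq]
        rintro ⟨-, h | h⟩
        · exact hNe.1 h
        · exact h hNe.2
      have hAny : anyB (pre ++ c :: suf) s (pre.length + 1) = true := by
        rw [anyB_succ _ _ _ hs, hlowc, h1]
        simp
      have hIH := IH s segs (by omega)
      rw [hAny] at hIH
      rw [hIH]
      conv_rhs => rw [specF]
      simp [hEnd]
    · -- 'i' ending a started segment: emit
      have hC : pre.length = (pre ++ c :: suf).length - 1 ∨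
          lowAt (pre ++ c :: suf) (pre.length + 1) ≠ "i" := by
        rcases h3.2 with h | h
        · exact Or.inl (hint.mp h)
        · exact Or.inr h
      have hEnd : isEndB (pre ++ c :: suf) pre.length = true := by
        simp only [isEndB, Bool.and_eq_true, Bool.or_eq_true, beq_iff_eq, bne_iff_ne]
        exact ⟨Or.inr (by rw [hlowc, h3.1]), hC⟩
      have hAny : anyB (pre ++ c :: suf) s (pre.length + 1) = true := by
        rw [anyB_succ _ _ _ hs, h4]
        simp
      have hIH := IH (pre.length + 1)
        (segs ++ [List.take (pre.length + 1 - s) (List.drop s (wordsL (pre ++ c :: suf) wd))])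
        (by omega)
      simp only [Nat.sub_self, List.take_zero, anyB_self] at hIH
      rw [hIH]
      conv_rhs => rw [specF]
      simp [hEnd, hAny]
    · -- 'i' ending an unstarted run: discard
      have hC : pre.length = (pre ++ c :: suf).length - 1 ∨
          lowAt (pre ++ c :: suf) (pre.length + 1) ≠ "i" := by
        rcases h3.2 with h | h
        · exact Or.inl (hint.mp h)
        · exact Or.inr h
      have hEnd : isEndB (pre ++ c :: suf) pre.length = true := by
        simp only [isEndB, Bool.and_eq_true, Bool.or_eq_true, beq_iff_eq, bne_iff_ne]
        exact ⟨Or.inr (by rw [hlowc, h3.1]), hC⟩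
      have h4' : anyB (pre ++ c :: suf) s pre.length = false := by
        simp only [Bool.not_eq_true] at h4
        exact h4
      have hAny : anyB (pre ++ c :: suf) s (pre.length + 1) = false := by
        rw [anyB_succ _ _ _ hs, h4', hlowc, h3.1]
        decide
      have hIH := IH (pre.length + 1) segs (by omega)
      simp only [Nat.sub_self, List.take_zero, anyB_self] at hIH
      rw [hIH]
      conv_rhs => rw [specF]
      simp [hEnd, hAny]
    · -- not a segment end: accumulate
      have hEnd : isEndB (pre ++ c :: suf) pre.length = false := by
        apply Bool.eq_false_iff.mpr
        simp only [isEndB, Bool.and_eq_true, Bool.or_eq_true, beq_iff_eq, bne_iff_ne, ne_eq]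
        by_cases hi2 : PySem.Str.lower c = "i"
        · have hnc : ¬((pre.length : Int) = (((pre ++ c :: suf).length : Nat) : Int) - 1 ∨
              lowAt (pre ++ c :: suf) (pre.length + 1) ≠ "i") := fun hcnd => h3 ⟨hi2, hcnd⟩
          push Not at hnc
          rintro ⟨-, h | h⟩
          · exact (fun hh => hnc.1 (hint.mpr hh)) h
          · exact h hnc.2
        · rintro ⟨h | h, -⟩
          · exact h1 (hlowc ▸ h)
          · exact hi2 (hlowc ▸ h)
      have hAny : anyB (pre ++ c :: suf) s (pre.length + 1)
          = anyB (pre ++ c :: suf) s pre.length := by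
        rw [anyB_succ _ _ _ hs, hlowc]
        simp [h1]
      have hIH := IH s segs (by omega)
      rw [hAny] at hIH
      rw [hIH]
      conv_rhs => rw [specF]
      simp [hEnd]

lemma wordsPort (cws wd : List String) :
    (PySem.List.pyRange 0 (cws.length : Int) 1).map
        (fun i => (PySem.List.pyGet? wd i).getD "") = wordsL cws wd := by
  simp [PySem.List.pyRange_one, List.map_map, Function.comp, wordsL]

-- ===== VERDICT (by name: the statement is the Claim_ definition above) =====
theorem char2word_bi_spec : Claim_equal_char2word_bi := by
  intro inst _ _
  unfold Spec_char2word_bi char2word_bi char2word_bi_alt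
  show aGo ((List.lookup "cws" inst).getD []) ((List.lookup "wd" inst).getD [])
      ((List.lookup "cws" inst).getD []).length
      (PySem.List.enumerate ((List.lookup "cws" inst).getD []) 0) [] [] false
    = bGo (((List.lookup "cws" inst).getD []).map PySem.Str.lower)
      ((PySem.List.pyRange 0 (((List.lookup "cws" inst).getD []).length : Int) 1).map
        (fun i => (PySem.List.pyGet? ((List.lookup "wd" inst).getD []) i).getD ""))
      ((PySem.List.pyRange 0 (((List.lookup "cws" inst).getD []).length : Int) 1).filter
        (bCond (((List.lookup "cws" inst).getD []).map PySem.Str.lower)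
          ((List.lookup "cws" inst).getD []).length))
      [] 0
  rw [wordsPort]
  have hA := lemA ((List.lookup "wd" inst).getD []) ((List.lookup "cws" inst).getD []) [] 0 []
    (by simp)
  simp only [List.nil_append, List.length_nil, Nat.cast_zero, Nat.sub_zero, List.take_zero,
    List.drop_zero, anyB_self] at hA
  have hB := lemB ((List.lookup "cws" inst).getD []) ((List.lookup "wd" inst).getD [])
    ((List.lookup "cws" inst).getD []).length 0 0 [] (by omega) (le_refl 0)
  simp only [Nat.cast_zero, List.nil_append] at hB
  exact hA.trans hB.symm
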